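-- pv_equiv track=rewrite | github.com/Semeriuss/A2SV-Labs | contest_problems/code_forces_10/makeProductEqualOne.py | makeProductEqualOne
-- ===== SOURCE A (Python) =====
-- import heapq
--
-- def makeProductEqualOne(nums):
--
--     evenNegativesCase = 0
--     oddNegativesCase = []
--     zeroCount = 0
--
--     negativeCount = 0
--
--     cost = 0
--     for num in nums:
--         if num > 0:
--             cost += abs(num - 1)
--         elif num < 0:
--             negativeCount += 1
--             evenNegativesCase += abs(num + 1)
--             heapq.heappush(oddNegativesCase, num)
--         else:
--             zeroCount += 1
--
--     if negativeCount % 2 == 0: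
--         cost += zeroCount
--         return cost + evenNegativesCase
--
--     while len(oddNegativesCase) > 1:
--         cost += abs(heapq.heappop(oddNegativesCase) + 1)
--
--     finalNegative = heapq.heappop(oddNegativesCase)
--     if zeroCount > 0:
--         cost += 1
--         cost += abs(finalNegative + 1)
--         zeroCount -= 1
--     else:
--         cost += abs(finalNegative - 1)
--
--     cost += zeroCount
--
--     return cost
-- ===== SOURCE B (Python) =====
-- def makeProductEqualOne(nums):
--     # Single pass, no heap: for negatives cost |n+1|; any odd-negative surplus
--     # costs a flat +2 only when there is no zero to flip sign for free.
--     cost = 0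
--     neg = 0
--     zero = 0
--     for num in nums:
--         if num > 0:
--             cost += num - 1
--         elif num < 0:
--             neg += 1
--             cost += -num - 1
--         else:
--             zero += 1
--     cost += zero
--     if neg % 2 == 1 and zero == 0:
--         cost += 2
--     return cost
-- ===== Notes on version B (the rewrite author's own statement) =====
-- stated objective: faster
-- what changed: Replaced the heap of negatives and the pop-all-but-one loop by a single pass counting negatives and zeros, since |n-1| - |n+1| = 2 for every negative n the +2 surcharge can be added arithmetically instead of singling out the maximal negative via a heap.
import Mathlib
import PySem

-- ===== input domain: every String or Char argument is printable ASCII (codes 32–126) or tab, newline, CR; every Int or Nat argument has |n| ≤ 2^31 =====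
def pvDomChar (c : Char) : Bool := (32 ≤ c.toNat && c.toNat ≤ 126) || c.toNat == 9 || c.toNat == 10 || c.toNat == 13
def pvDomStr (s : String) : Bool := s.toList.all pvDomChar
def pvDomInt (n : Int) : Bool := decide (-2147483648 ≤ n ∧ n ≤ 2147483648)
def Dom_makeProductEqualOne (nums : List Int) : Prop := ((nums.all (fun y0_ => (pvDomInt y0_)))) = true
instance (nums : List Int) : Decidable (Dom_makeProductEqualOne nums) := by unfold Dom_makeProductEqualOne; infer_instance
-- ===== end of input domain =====

-- ===== PORT A =====
-- heapq is modeled by a sorted list: heappush = ordered insert, heappop = take the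
-- head (the minimum); exact for A, which only pushes and pops the minimum.
def aStep (s : Int × List Int × Int × Int × Int) (num : Int) : Int × List Int × Int × Int × Int :=
  match s with
  | (even, heap, zero, neg, cost) =>
    if num > 0 then (even, heap, zero, neg, cost + |num - 1|)
    else if num < 0 then (even + |num + 1|, heap.orderedInsert (· ≤ ·) num, zero, neg + 1, cost)
    else (even, heap, zero + 1, neg, cost)

-- the 'while len(...) > 1' loop: pop the minimum (head) until one element remains
def aWhile (cost : Int) (heap : List Int) : Int × List Int :=
  match heap with
  | x :: y :: rest => aWhile (cost + |x + 1|) (y :: rest)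
  | _ => (cost, heap)

def makeProductEqualOne (nums : List Int) : Int :=
  match nums.foldl aStep (0, [], 0, 0, 0) with
  | (even, heap, zero, neg, cost) =>
    if neg % 2 == 0 then (cost + zero) + even
    else
      match aWhile cost heap with
      | (cost1, heap1) =>
        match heap1 with
        | [] => 0  -- unreachable (Python would raise IndexError; neg odd ⇒ heap nonempty)
        | f :: _ =>
          if zero > 0 then ((cost1 + 1) + |f + 1|) + (zero - 1)
          else (cost1 + |f - 1|) + zero

-- ===== PORT B =====
def bStep (s : Int × Int × Int) (num : Int) : Int × Int × Int :=
  match s with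
  | (cost, neg, zero) =>
    if num > 0 then (cost + (num - 1), neg, zero)
    else if num < 0 then (cost + (-num - 1), neg + 1, zero)
    else (cost, neg, zero + 1)

def makeProductEqualOne_alt (nums : List Int) : Int :=
  match nums.foldl bStep (0, 0, 0) with
  | (cost, neg, zero) =>
    let cost := cost + zero
    if neg % 2 == 1 && zero == 0 then cost + 2 else cost

-- ===== PRECONDITION & SPEC =====
def Spec_makeProductEqualOne (nums : List Int) (out : Int) : Prop := out = makeProductEqualOne_alt nums
instance (nums : List Int) (out : Int) : Decidable (Spec_makeProductEqualOne nums out) := by unfold Spec_makeProductEqualOne; infer_instance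

-- ===== CLAIM (what is proved, stated in full; the proofs are below) =====
def Claim_equal_makeProductEqualOne : Prop := ∀ (nums : List Int), Dom_makeProductEqualOne nums → Spec_makeProductEqualOne nums (makeProductEqualOne nums)

-- ===== LEMMAS AND PROOFS =====

def sumAbs (l : List Int) : Int := (l.map (fun x => |x + 1|)).sum

-- invariant linking A's fold state with B's fold state
def PInv (a : Int × List Int × Int × Int × Int) (b : Int × Int × Int) : Prop :=
  match a, b with
  | (even, heap, zero, neg, cost), (c, n, z) =>
    c = cost + even ∧ n = neg ∧ z = zero ∧ 0 ≤ zero ∧ even = sumAbs heap ∧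
    (∀ x ∈ heap, x < 0) ∧ neg = heap.length

theorem pinv_step (a : Int × List Int × Int × Int × Int) (b : Int × Int × Int)
    (num : Int) (h : PInv a b) : PInv (aStep a num) (bStep b num) := by
  obtain ⟨even, heap, zero, neg, cost⟩ := a
  obtain ⟨c, n, z⟩ := b
  obtain ⟨h1, h2, h3, h0, h4, h5, h6⟩ := h
  by_cases hp : num > 0
  · simp only [aStep, bStep, if_pos hp]
    have habs : |num - 1| = num - 1 := abs_of_nonneg (by omega)
    exact ⟨by omega, h2, h3, h0, h4, h5, h6⟩
  · by_cases hn : num < 0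
    · have hperm : (heap.orderedInsert (· ≤ ·) num).Perm (num :: heap) :=
        List.perm_orderedInsert _ _ _
      have hsum : sumAbs (heap.orderedInsert (· ≤ ·) num) = |num + 1| + sumAbs heap := by
        unfold sumAbs
        rw [(hperm.map (fun x => |x + 1|)).sum_eq]
        simp
      have hmem : ∀ x ∈ heap.orderedInsert (· ≤ ·) num, x < 0 := by
        intro x hx
        rcases List.mem_cons.mp (hperm.mem_iff.mp hx) with hq | hq
        · subst hq; exact hn
        · exact h5 x hq
      have hlen : (heap.orderedInsert (· ≤ ·) num).length = heap.length + 1 := by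
        rw [hperm.length_eq]; simp
      have habs : |num + 1| = -num - 1 := by
        rw [abs_of_nonpos (by omega)]; ring
      simp only [aStep, bStep, if_neg hp, if_pos hn]
      exact ⟨by omega, by omega, h3, h0, by omega, hmem, by rw [hlen]; omega⟩
    · simp only [aStep, bStep, if_neg hp, if_neg hn]
      exact ⟨h1, h2, by omega, by omega, h4, h5, h6⟩

theorem pinv_fold (nums : List Int) (a : Int × List Int × Int × Int × Int)
    (b : Int × Int × Int) (h : PInv a b) : PInv (nums.foldl aStep a) (nums.foldl bStep b) := by
  induction nums generalizing a b with
  | nil => exact h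
  | cons x xs ih => exact ih _ _ (pinv_step a b x h)

theorem aWhile_spec (heap : List Int) (cost : Int) (h : heap ≠ []) :
    ∃ f, f ∈ heap ∧ aWhile cost heap = (cost + (sumAbs heap - |f + 1|), [f]) := by
  induction heap generalizing cost with
  | nil => exact absurd rfl h
  | cons x xs ih =>
    match xs with
    | [] =>
      refine ⟨x, by simp, ?_⟩
      simp [aWhile, sumAbs]
    | y :: rest =>
      obtain ⟨f, hf, heq⟩ := ih (cost := cost + |x + 1|) (by simp)
      refine ⟨f, List.mem_cons_of_mem _ hf, ?_⟩
      rw [show aWhile cost (x :: y :: rest) = aWhile (cost + |x + 1|) (y :: rest) from rfl, heq]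
      have hs : sumAbs (x :: y :: rest) = |x + 1| + sumAbs (y :: rest) := by simp [sumAbs]
      rw [hs]
      congr 1
      ring

theorem makeProductEqualOne_eq (nums : List Int) :
    makeProductEqualOne nums = makeProductEqualOne_alt nums := by
  have hrel := pinv_fold nums (0, [], 0, 0, 0) (0, 0, 0) (by exact ⟨by ring, rfl, rfl, le_refl 0, rfl, by simp, rfl⟩)
  unfold makeProductEqualOne makeProductEqualOne_alt
  rcases hA : nums.foldl aStep (0, [], 0, 0, 0) with ⟨even, heap, zero, neg, cost⟩
  rcases hB : nums.foldl bStep (0, 0, 0) with ⟨c, n, z⟩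
  rw [hA, hB] at hrel
  obtain ⟨h1, h2, h3, h0, h4, h5, h6⟩ := hrel
  show (if (neg % 2 == 0) = true then (cost + zero) + even
        else match aWhile cost heap with
             | (cost1, heap1) =>
               match heap1 with
               | [] => 0
               | f :: _ => if zero > 0 then ((cost1 + 1) + |f + 1|) + (zero - 1)
                           else (cost1 + |f - 1|) + zero)
       = (if (n % 2 == 1 && z == 0) = true then (c + z) + 2 else c + z)
  by_cases hpar : neg % 2 = 0
  · rw [if_pos (by simp [hpar]), if_neg (by simp [h2, h3, hpar])]
    omega
  · have hpar1 : neg % 2 = 1 := by omega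
    have hlen : heap ≠ [] := by
      intro hnil
      rw [hnil] at h6
      simp at h6
      omega
    obtain ⟨f, hfmem, hw⟩ := aWhile_spec heap cost hlen
    have hf0 : f < 0 := h5 f hfmem
    have habs1 : |f + 1| = -(f + 1) := abs_of_nonpos (by omega)
    have habs2 : |f - 1| = -(f - 1) := abs_of_nonpos (by omega)
    rw [if_neg (by simp [hpar1]), hw]
    show (if zero > 0 then ((cost + (sumAbs heap - |f + 1|)) + 1 + |f + 1|) + (zero - 1)
          else ((cost + (sumAbs heap - |f + 1|)) + |f - 1|) + zero) = _
    rw [← h4, habs1, habs2]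
    by_cases hz : zero > 0
    · rw [if_pos hz, if_neg (by simp [h3]; omega)]
      omega
    · rw [if_neg hz, if_pos (by simp [h2, h3, hpar1]; omega)]
      omega

-- ===== VERDICT (by name: the statement is the Claim_ definition above) =====
theorem makeProductEqualOne_spec : Claim_equal_makeProductEqualOne := by
  intro nums _
  exact makeProductEqualOne_eq nums
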